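-- pv_equiv track=rewrite | github.com/pranavenzo/BlackHoles | engine.py | __compute_best_players_and_score
-- ===== SOURCE A (Python) =====
-- def __compute_best_players_and_score(player_scores):
--     max_score = -1
--     max_players = []
--     for player in player_scores:
--         if max_score < player_scores[player]:
--             max_score = player_scores[player]
--             max_players = [player]
--         elif max_score == player_scores[player]:
--             max_players.append(player)
--     return max_players, max_score
-- ===== SOURCE B (Python) =====
-- def __compute_best_players_and_score(player_scores):
--     best = max([-1, *player_scores.values()])
--     return [p for p, v in player_scores.items() if v == best], best
-- ===== Notes on version B (the rewrite author's own statement) =====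
-- stated objective: simpler
-- what changed: Replaces A's single interleaved running-max scan with reset/append state by a compute-then-filter decomposition: take the max of -1 and all scores first, then list the players whose score equals it.
import Mathlib
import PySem

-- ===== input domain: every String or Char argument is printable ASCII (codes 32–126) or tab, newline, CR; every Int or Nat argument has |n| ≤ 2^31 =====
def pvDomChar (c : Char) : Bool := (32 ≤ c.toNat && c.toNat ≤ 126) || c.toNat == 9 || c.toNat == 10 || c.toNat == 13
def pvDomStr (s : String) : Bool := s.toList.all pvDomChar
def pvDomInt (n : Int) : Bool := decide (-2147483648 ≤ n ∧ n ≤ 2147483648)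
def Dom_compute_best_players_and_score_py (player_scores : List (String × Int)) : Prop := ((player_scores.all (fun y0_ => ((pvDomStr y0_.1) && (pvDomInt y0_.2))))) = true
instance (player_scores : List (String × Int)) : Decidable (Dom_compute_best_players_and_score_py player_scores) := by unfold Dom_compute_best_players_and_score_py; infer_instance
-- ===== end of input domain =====

-- B replaces A's interleaved running-max/reset/append scan by a compute-then-filter
-- two-pass decomposition (objective: simpler); same return value on every dict.

-- ===== PORT A =====
-- A's loop: state (max_players, max_score), reset on a strictly larger score, append on a tie.
def pvALoop : List (String × Int) → List String × Int → List String × Int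
  | [], st => st
  | (player, score) :: rest, (max_players, max_score) =>
    if max_score < score then pvALoop rest ([player], score)
    else if max_score = score then pvALoop rest (max_players ++ [player], max_score)
    else pvALoop rest (max_players, max_score)

def compute_best_players_and_score_py (player_scores : List (String × Int)) : List String × Int :=
  pvALoop player_scores ([], -1)

-- ===== PORT B =====
-- best = max([-1, *values]); then filter the items whose value equals best.
def compute_best_players_and_score_py_alt (player_scores : List (String × Int)) : List String × Int :=
  let best : Int := player_scores.foldl (fun a x => max a x.2) (-1)
  ((player_scores.filter (fun x => x.2 = best)).map Prod.fst, best)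

-- ===== PRECONDITION & SPEC =====
def Spec_compute_best_players_and_score_py (player_scores : List (String × Int)) (out : List String × Int) : Prop := out = compute_best_players_and_score_py_alt player_scores
instance (player_scores : List (String × Int)) (out : List String × Int) : Decidable (Spec_compute_best_players_and_score_py player_scores out) := by unfold Spec_compute_best_players_and_score_py; infer_instance

-- ===== CLAIM (what is proved, stated in full; the proofs are below) =====
def Claim_equal_compute_best_players_and_score_py : Prop := ∀ (player_scores : List (String × Int)), Dom_compute_best_players_and_score_py player_scores → Spec_compute_best_players_and_score_py player_scores (compute_best_players_and_score_py player_scores)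

-- ===== LEMMAS AND PROOFS =====

-- the seed is a lower bound of the running max
lemma pv_le_foldl_max (l : List (String × Int)) (b : Int) :
    b ≤ l.foldl (fun a x => max a x.2) b := by
  induction l generalizing b with
  | nil => simp
  | cons h t ih => exact le_trans (le_max_left _ _) (ih (max b h.2))

-- loop invariant: A's loop from state (mp, ms) returns the running max m of ms and the
-- values, keeping mp only if no value beat ms, followed by the keys whose value equals m.
lemma pvALoop_inv (l : List (String × Int)) (mp : List String) (ms : Int) :
    pvALoop l (mp, ms) =
      ((if l.foldl (fun a x => max a x.2) ms = ms then mp else []) ++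
        (l.filter (fun x => x.2 = l.foldl (fun a x => max a x.2) ms)).map Prod.fst,
       l.foldl (fun a x => max a x.2) ms) := by
  induction l generalizing mp ms with
  | nil => simp [pvALoop]
  | cons h t ih =>
    obtain ⟨p, v⟩ := h
    have hle : max ms v ≤ t.foldl (fun a x => max a x.2) (max ms v) := pv_le_foldl_max t _
    by_cases h1 : ms < v
    · have hmax : max ms v = v := by omega
      rw [show pvALoop ((p, v) :: t) (mp, ms) = pvALoop t ([p], v) by simp [pvALoop, h1]]
      rw [ih]
      have hfold : t.foldl (fun a x => max a x.2) v
          = ((p, v) :: t).foldl (fun a x => max a x.2) ms := by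
        simp [List.foldl_cons, hmax]
      set M := t.foldl (fun a x => max a x.2) v with hM
      have hvM : v ≤ M := by rw [hM]; have := pv_le_foldl_max t v; exact this
      have hmsM : ms < M := lt_of_lt_of_le h1 hvM
      rw [← hfold]
      by_cases h2 : M = v
      · simp [h2, List.filter_cons]
        intro hvm; omega
      · have : ¬ ((v : Int) = M) := fun hh => h2 hh.symm
        simp [h2, hmsM.ne', List.filter_cons, this]
    · by_cases h2 : ms = v
      · rw [show pvALoop ((p, v) :: t) (mp, ms) = pvALoop t (mp ++ [p], ms) by
          simp [pvALoop, h1, h2]]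
        rw [ih]
        have hmax : max ms v = ms := by omega
        have hfold : t.foldl (fun a x => max a x.2) ms
            = ((p, v) :: t).foldl (fun a x => max a x.2) ms := by
          simp [List.foldl_cons, hmax]
        set M := t.foldl (fun a x => max a x.2) ms with hM
        rw [← hfold]
        by_cases h3 : M = ms
        · have : ((v : Int) = M) := by omega
          simp [h3, this, ← h2]
        · have : ¬ ((v : Int) = M) := by omega
          simp [h3, this]
      · have h3 : v < ms := by omega
        rw [show pvALoop ((p, v) :: t) (mp, ms) = pvALoop t (mp, ms) by
          simp [pvALoop, h1, h2]]
        rw [ih]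
        have hmax : max ms v = ms := by omega
        have hfold : t.foldl (fun a x => max a x.2) ms
            = ((p, v) :: t).foldl (fun a x => max a x.2) ms := by
          simp [List.foldl_cons, hmax]
        set M := t.foldl (fun a x => max a x.2) ms with hM
        have hmsM : ms ≤ M := pv_le_foldl_max t ms
        rw [← hfold]
        have : ¬ ((v : Int) = M) := by omega
        simp [this]

-- ===== VERDICT (by name: the statement is the Claim_ definition above) =====
theorem compute_best_players_and_score_py_spec : Claim_equal_compute_best_players_and_score_py := by
  intro l _
  unfold Spec_compute_best_players_and_score_py compute_best_players_and_score_py compute_best_players_and_score_py_alt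
  rw [pvALoop_inv]
  split <;> simp
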